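-- pv_equiv track=rewrite | github.com/vibeswithkk/Large-Language-Model-DEMO | src/training/train_toy.py | create_sample_data
-- ===== SOURCE A (Python) =====
-- def create_sample_data(num_samples: int = 10000) -> list:
--     base_texts = [
--         "The quick brown fox jumps over the lazy dog.",
--         "Machine learning is a subset of artificial intelligence.",
--         "Natural language processing enables computers to understand text.",
--         "Deep learning models require large amounts of data.",
--         "Transformers have revolutionized the field of NLP.",
--         "Attention mechanisms allow models to focus on relevant parts.",
--         "Python is a popular programming language for machine learning.",
--         "PyTorch provides flexible tools for deep learning research.",
--         "Data preprocessing is crucial for model performance.",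
--         "Model evaluation helps measure the effectiveness of algorithms."
--     ]
--
--     # Generate a larger dataset
--     sample_texts = []
--     for i in range(num_samples):
--         text = base_texts[i % len(base_texts)] + " " + base_texts[(i + 1) % len(base_texts)]
--         sample_texts.append(text[:256])  # Limit text length
--
--     return sample_texts
-- ===== SOURCE B (Python) =====
-- def create_sample_data(num_samples: int = 10000) -> list:
--     base_texts = [
--         "The quick brown fox jumps over the lazy dog.",
--         "Machine learning is a subset of artificial intelligence.",
--         "Natural language processing enables computers to understand text.",
--         "Deep learning models require large amounts of data.",
--         "Transformers have revolutionized the field of NLP.",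
--         "Attention mechanisms allow models to focus on relevant parts.",
--         "Python is a popular programming language for machine learning.",
--         "PyTorch provides flexible tools for deep learning research.",
--         "Data preprocessing is crucial for model performance.",
--         "Model evaluation helps measure the effectiveness of algorithms."
--     ]
--     n = len(base_texts)
--     combined = [(base_texts[j] + " " + base_texts[(j + 1) % n])[:256] for j in range(n)]
--     return [combined[i % n] for i in range(num_samples)]
-- ===== Notes on version B (the rewrite author's own statement) =====
-- stated objective: alternative
-- what changed: B precomputes the ten distinct combined-and-truncated strings once into a table and builds the result by cycling that table, instead of concatenating and slicing two base texts afresh for every output element; it trades a small fixed table-building pass for the per-element string building.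
import Mathlib
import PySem

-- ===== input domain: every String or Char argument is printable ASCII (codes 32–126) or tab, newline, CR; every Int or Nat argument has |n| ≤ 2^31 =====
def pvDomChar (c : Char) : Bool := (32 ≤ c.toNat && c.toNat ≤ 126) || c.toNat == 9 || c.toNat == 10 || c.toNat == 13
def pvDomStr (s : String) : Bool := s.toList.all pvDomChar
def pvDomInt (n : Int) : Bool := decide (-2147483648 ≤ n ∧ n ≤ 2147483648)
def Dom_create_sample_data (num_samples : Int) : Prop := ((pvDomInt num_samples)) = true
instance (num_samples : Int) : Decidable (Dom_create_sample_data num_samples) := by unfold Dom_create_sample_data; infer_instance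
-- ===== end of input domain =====

-- B precomputes the ten combined (and truncated) strings once and cycles that table, instead of
-- concatenating and slicing per output element (alternative decomposition).

-- ===== PORT A =====
def pvBaseTexts : List String := [
  "The quick brown fox jumps over the lazy dog.",
  "Machine learning is a subset of artificial intelligence.",
  "Natural language processing enables computers to understand text.",
  "Deep learning models require large amounts of data.",
  "Transformers have revolutionized the field of NLP.",
  "Attention mechanisms allow models to focus on relevant parts.",
  "Python is a popular programming language for machine learning.",
  "PyTorch provides flexible tools for deep learning research.",
  "Data preprocessing is crucial for model performance.",
  "Model evaluation helps measure the effectiveness of algorithms."]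

def create_sample_data (num_samples : Int) : List String :=
  (PySem.List.pyRange 0 num_samples 1).foldl (fun sample_texts i =>
    let text :=
      PySem.List.pyGetD pvBaseTexts (PySem.Int.mod i (PySem.List.len pvBaseTexts)) "" ++ " " ++
      PySem.List.pyGetD pvBaseTexts (PySem.Int.mod (i + 1) (PySem.List.len pvBaseTexts)) ""
    sample_texts ++ [PySem.Str.slice text none (some 256)]) []

-- ===== PORT B =====
def create_sample_data_alt (num_samples : Int) : List String :=
  let n := PySem.List.len pvBaseTexts
  let combined := (PySem.List.pyRange 0 n 1).map (fun j =>
    PySem.Str.slice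
      (PySem.List.pyGetD pvBaseTexts j "" ++ " " ++
       PySem.List.pyGetD pvBaseTexts (PySem.Int.mod (j + 1) n) "") none (some 256))
  (PySem.List.pyRange 0 num_samples 1).map (fun i =>
    PySem.List.pyGetD combined (PySem.Int.mod i n) "")

-- ===== PRECONDITION & SPEC =====
def Spec_create_sample_data (num_samples : Int) (out : List String) : Prop := out = create_sample_data_alt num_samples
instance (num_samples : Int) (out : List String) : Decidable (Spec_create_sample_data num_samples out) := by unfold Spec_create_sample_data; infer_instance

-- ===== CLAIM (what is proved, stated in full; the proofs are below) =====
def Claim_equal_create_sample_data : Prop := ∀ (num_samples : Int), Dom_create_sample_data num_samples → Spec_create_sample_data num_samples (create_sample_data num_samples)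

-- ===== LEMMAS AND PROOFS =====

lemma pv_pointwise (i : Int) :
    PySem.Str.slice
      (PySem.List.pyGetD pvBaseTexts (PySem.Int.mod i (PySem.List.len pvBaseTexts)) "" ++ " " ++
       PySem.List.pyGetD pvBaseTexts (PySem.Int.mod (i + 1) (PySem.List.len pvBaseTexts)) "") none (some 256) =
    PySem.List.pyGetD
      ((PySem.List.pyRange 0 (PySem.List.len pvBaseTexts) 1).map (fun j =>
        PySem.Str.slice
          (PySem.List.pyGetD pvBaseTexts j "" ++ " " ++
           PySem.List.pyGetD pvBaseTexts (PySem.Int.mod (j + 1) (PySem.List.len pvBaseTexts)) "") none (some 256)))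
      (PySem.Int.mod i (PySem.List.len pvBaseTexts)) "" := by
  have hlen : PySem.List.len pvBaseTexts = 10 := by decide
  rw [hlen]
  have h0 : (0:Int) < 10 := by norm_num
  rw [PySem.List.pyGetD_map_pyRange_of_nonneg _ _ _ _
        (PySem.Int.mod_nonneg i h0) (PySem.Int.mod_lt i h0)]
  have hmod : PySem.Int.mod (PySem.Int.mod i 10 + 1) 10 = PySem.Int.mod (i + 1) 10 := by
    rw [PySem.Int.mod_eq_emod_of_pos h0, PySem.Int.mod_eq_emod_of_pos h0,
        PySem.Int.mod_eq_emod_of_pos h0]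
    omega
  rw [hmod]

-- ===== VERDICT (by name: the statement is the Claim_ definition above) =====
theorem create_sample_data_spec : Claim_equal_create_sample_data := by
  intro num_samples _
  show _ = _
  unfold create_sample_data create_sample_data_alt
  rw [PySem.List.foldl_append_singleton_eq_map]
  exact List.map_congr_left fun i _ => pv_pointwise i
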